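-- pv_equiv track=rewrite | github.com/khvilaboa/tuenti_challenge_10 | 11_possibilities_alt.py | limit_occ
-- ===== SOURCE A (Python) =====
-- def limit_occ(comb, max_occ):
--     i = 1
--     n = comb[0]
--     cont = 1
--     ncomb = []
--     while i < len(comb):
--         if n == comb[i] and cont < max_occ:
--             cont += 1
--         elif n != comb[i]:
--             ncomb.extend([n]*cont)
--             n = comb[i]
--             cont = 1
--         i += 1
--     ncomb.extend([n] * cont)
--     return ncomb
-- ===== SOURCE B (Python) =====
-- def limit_occ(comb, max_occ):
--     cap = max(1, max_occ)
--     runs = []  # run-length encoding: [value, count] pairs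
--     for x in comb:
--         if runs and runs[-1][0] == x:
--             runs[-1][1] += 1
--         else:
--             runs.append([x, 1])
--     return [k for k, c in runs for _ in range(min(c, cap))]
-- ===== Notes on version B (the rewrite author's own statement) =====
-- stated objective: simpler
-- what changed: Replaces A's index-driven while loop with mutable run state by a two-phase decomposition: run-length encode the list, then expand each run to min(count, max(1, max_occ)) copies.
import Mathlib
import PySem

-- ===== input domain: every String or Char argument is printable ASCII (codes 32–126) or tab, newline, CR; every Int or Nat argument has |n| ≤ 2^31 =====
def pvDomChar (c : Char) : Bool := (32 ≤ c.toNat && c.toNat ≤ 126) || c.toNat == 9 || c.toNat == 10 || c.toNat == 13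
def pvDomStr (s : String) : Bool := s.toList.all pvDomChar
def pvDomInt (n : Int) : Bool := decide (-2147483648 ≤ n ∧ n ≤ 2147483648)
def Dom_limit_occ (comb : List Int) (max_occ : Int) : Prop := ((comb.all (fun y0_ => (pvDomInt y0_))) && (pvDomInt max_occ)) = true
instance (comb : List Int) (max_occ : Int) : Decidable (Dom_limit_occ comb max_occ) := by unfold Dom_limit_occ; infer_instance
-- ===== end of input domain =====

-- B replaces A's index-driven while loop with run-length encoding followed by expansion (objective: simpler).
-- A raises IndexError on empty comb; Pre_ excludes exactly that input.

-- ===== PORT A =====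
-- the while loop of A: state (n, cont, ncomb), iterating over comb[1:]
def limitOccLoopA (rest : List Int) (n cont : Int) (ncomb : List Int) (max_occ : Int) : List Int :=
  match rest with
  | [] => ncomb ++ List.replicate cont.toNat n
  | x :: rest' =>
    if n = x ∧ cont < max_occ then
      limitOccLoopA rest' n (cont + 1) ncomb max_occ
    else if n ≠ x then
      limitOccLoopA rest' x 1 (ncomb ++ List.replicate cont.toNat n) max_occ
    else
      limitOccLoopA rest' n cont ncomb max_occ

def limit_occ (comb : List Int) (max_occ : Int) : List Int :=
  match comb with
  | [] => []  -- comb[0] raises IndexError in Python; excluded by Pre_limit_occ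
  | c0 :: rest => limitOccLoopA rest c0 1 [] max_occ

-- ===== PORT B =====
-- one step of B's run-length-encoding loop: increment the last run's count or start a new run
def addRun (runs : List (Int × Int)) (x : Int) : List (Int × Int) :=
  match runs.getLast? with
  | some (k, c) => if k = x then runs.dropLast ++ [(k, c + 1)] else runs ++ [(x, 1)]
  | none => [(x, 1)]

def limit_occ_alt (comb : List Int) (max_occ : Int) : List Int :=
  let cap := max 1 max_occ
  let runs := comb.foldl addRun []
  runs.flatMap (fun kc => List.replicate (min kc.2 cap).toNat kc.1)

-- ===== PRECONDITION & SPEC =====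
def Pre_limit_occ (comb : List Int) (max_occ : Int) : Prop := comb ≠ []
instance (comb : List Int) (max_occ : Int) : Decidable (Pre_limit_occ comb max_occ) := by unfold Pre_limit_occ; infer_instance
def pvWitness_limit_occ : List Int × Int := ([1, 1, 1, 2], 2)

def Spec_limit_occ (comb : List Int) (max_occ : Int) (out : List Int) : Prop := out = limit_occ_alt comb max_occ
instance (comb : List Int) (max_occ : Int) (out : List Int) : Decidable (Spec_limit_occ comb max_occ out) := by unfold Spec_limit_occ; infer_instance

-- ===== CLAIM (what is proved, stated in full; the proofs are below) =====
def Claim_equal_limit_occ : Prop := ∀ (comb : List Int) (max_occ : Int), Dom_limit_occ comb max_occ → Pre_limit_occ comb max_occ → Spec_limit_occ comb max_occ (limit_occ comb max_occ)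

-- ===== LEMMAS AND PROOFS =====

theorem addRun_ne_nil (runs : List (Int × Int)) (x : Int) : addRun runs x ≠ [] := by
  unfold addRun
  cases h : runs.getLast? with
  | none => simp
  | some kc => cases kc with | mk k c => dsimp; split <;> simp

theorem addRun_append (p r : List (Int × Int)) (x : Int) (hr : r ≠ []) :
    addRun (p ++ r) x = p ++ addRun r x := by
  unfold addRun
  rw [List.getLast?_append_of_ne_nil p hr]
  cases h : r.getLast? with
  | none => simp [List.getLast?_eq_none_iff] at h; exact absurd h hr
  | some kc =>
    cases kc with | mk k c =>
    dsimp
    split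
    · rw [List.dropLast_append_of_ne_nil hr]; simp
    · simp

theorem foldl_addRun_append (rest : List Int) (p r : List (Int × Int)) (hr : r ≠ []) :
    List.foldl addRun (p ++ r) rest = p ++ List.foldl addRun r rest := by
  induction rest generalizing r with
  | nil => simp
  | cons x rest ih =>
    simp only [List.foldl_cons]
    rw [addRun_append p r x hr]
    exact ih (addRun r x) (addRun_ne_nil r x)

-- shorthand for B's expansion phase
def expandRuns (cap : Int) (runs : List (Int × Int)) : List Int :=
  runs.flatMap (fun kc => List.replicate (min kc.2 cap).toNat kc.1)

theorem loopA_eq (max_occ : Int) (rest : List Int) :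
    ∀ (n m : Int) (ncomb : List Int), 1 ≤ m →
    limitOccLoopA rest n (min m (max 1 max_occ)) ncomb max_occ
      = ncomb ++ expandRuns (max 1 max_occ) (List.foldl addRun [(n, m)] rest) := by
  induction rest with
  | nil =>
    intro n m ncomb hm
    simp [limitOccLoopA, expandRuns]
  | cons x rest ih =>
    intro n m ncomb hm
    simp only [limitOccLoopA, List.foldl_cons]
    by_cases hc : n = x ∧ min m (max 1 max_occ) < max_occ
    · obtain ⟨hnx, hlt⟩ := hc; subst hnx
      rw [if_pos ⟨rfl, hlt⟩]
      have h1 : min m (max 1 max_occ) + 1 = min (m + 1) (max 1 max_occ) := by omega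
      rw [h1, ih n (m + 1) ncomb (by omega)]
      simp [addRun]
    · rw [if_neg hc]
      by_cases hnx : n = x
      · subst hnx
        rw [if_neg (by simp)]
        have hlt' : ¬ min m (max 1 max_occ) < max_occ := fun h => hc ⟨rfl, h⟩
        have hcap : min m (max 1 max_occ) = min (m + 1) (max 1 max_occ) := by omega
        rw [hcap, ih n (m + 1) ncomb (by omega)]
        simp [addRun]
      · rw [if_pos hnx]
        have h2 := ih x 1 (ncomb ++ List.replicate (min m (max 1 max_occ)).toNat n) (by omega)
        rw [show min (1 : Int) (max 1 max_occ) = 1 from by omega] at h2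
        rw [h2]
        have haddr : addRun [(n, m)] x = [(n, m)] ++ [(x, 1)] := by
          simp [addRun, hnx]
        rw [haddr, foldl_addRun_append rest [(n, m)] [(x, 1)] (by simp)]
        simp [expandRuns]

-- ===== VERDICT (by name: the statement is the Claim_ definition above) =====
theorem limit_occ_spec : Claim_equal_limit_occ := by
  intro comb max_occ _ hpre
  unfold Spec_limit_occ
  match comb with
  | [] => exact absurd rfl hpre
  | c0 :: rest =>
    show limitOccLoopA rest c0 1 [] max_occ = _
    have h1 : (1 : Int) = min 1 (max 1 max_occ) := by omega
    rw [h1, loopA_eq max_occ rest c0 1 [] (by omega)]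
    simp [limit_occ_alt, expandRuns, addRun]
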